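-- pv_equiv track=rewrite | github.com/LeoGillet/batch-swiss-model-wrapper | src/parser.py | unique_sequences_stats
-- ===== SOURCE A (Python) =====
-- def unique_sequences_stats(sequences: list[tuple[str, str]]) -> dict:
--     """
--     Creates a dict with all names with same target sequence
--     """
--     unique_sequences = {}
--     for name, seq in sequences:
--         if seq in unique_sequences.keys():
--             unique_sequences[seq].append(name)
--             continue
--         unique_sequences[seq] = [name]
--     return unique_sequences
-- ===== SOURCE B (Python) =====
-- def unique_sequences_stats(sequences: list[tuple[str, str]]) -> dict:
--     """
--     Creates a dict with all names with same target sequence.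
--     Two-pass strategy: ordered dedup of the sequences first, then one
--     comprehension per unique sequence gathering its names.
--     """
--     order = list(dict.fromkeys(seq for _, seq in sequences))
--     return {s: [name for name, seq in sequences if seq == s] for s in order}
-- ===== Notes on version B (the rewrite author's own statement) =====
-- stated objective: alternative
-- what changed: Replaces A's single-pass dict accumulation (branching on key presence and appending in place) with a two-pass grouping: an ordered dedup of the sequences followed by one filtering comprehension per unique sequence.
import Mathlib
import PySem

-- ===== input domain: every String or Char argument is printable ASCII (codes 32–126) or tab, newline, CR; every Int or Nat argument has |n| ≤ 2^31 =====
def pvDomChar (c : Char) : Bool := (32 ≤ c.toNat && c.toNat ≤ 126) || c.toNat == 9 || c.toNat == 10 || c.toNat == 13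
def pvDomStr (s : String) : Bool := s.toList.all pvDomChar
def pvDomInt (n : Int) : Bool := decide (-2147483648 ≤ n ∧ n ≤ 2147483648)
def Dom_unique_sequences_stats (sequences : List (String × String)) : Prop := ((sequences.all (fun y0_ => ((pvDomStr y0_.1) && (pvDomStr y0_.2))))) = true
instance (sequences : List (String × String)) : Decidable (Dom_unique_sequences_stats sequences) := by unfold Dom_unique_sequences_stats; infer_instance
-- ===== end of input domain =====

-- B replaces A's single-pass dict accumulation by an ordered dedup of the
-- sequences followed by one filtering pass per unique sequence (alternative
-- decomposition, same return value).

-- ===== PORT A =====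
-- for name, seq in sequences: if seq in d.keys(): d[seq].append(name) else d[seq] = [name]
def unique_sequences_stats (sequences : List (String × String)) : List (String × List String) :=
  (sequences.foldl
    (fun d p =>
      if d.contains p.2 then d.modify p.2 [] (fun v => v ++ [p.1])
      else d.insert p.2 [p.1])
    (PySem.Dict.empty : PySem.Dict String (List String))).items

-- ===== PORT B =====
-- order = list(dict.fromkeys(seq for _, seq in sequences));
-- {s: [name for name, seq in sequences if seq == s] for s in order}
def unique_sequences_stats_alt (sequences : List (String × String)) : List (String × List String) :=
  (PySem.List.dedup (sequences.map Prod.snd)).map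
    (fun s => (s, (sequences.filter (fun p => p.2 == s)).map Prod.fst))

-- ===== PRECONDITION & SPEC =====
def Spec_unique_sequences_stats (sequences : List (String × String)) (out : List (String × List String)) : Prop := out = unique_sequences_stats_alt sequences
instance (sequences : List (String × String)) (out : List (String × List String)) : Decidable (Spec_unique_sequences_stats sequences out) := by unfold Spec_unique_sequences_stats; infer_instance

-- ===== CLAIM (what is proved, stated in full; the proofs are below) =====
def Claim_equal_unique_sequences_stats : Prop := ∀ (sequences : List (String × String)), Dom_unique_sequences_stats sequences → Spec_unique_sequences_stats sequences (unique_sequences_stats sequences)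

-- ===== LEMMAS AND PROOFS =====

-- A's loop body is Python's d[k] = d.get(k, []) + [name], i.e. Dict.modify.
lemma stepA_eq_modify (d : PySem.Dict String (List String)) (p : String × String) :
    (if d.contains p.2 then d.modify p.2 [] (fun v => v ++ [p.1])
     else d.insert p.2 [p.1])
      = d.modify p.2 [] (fun v => v ++ [p.1]) := by
  by_cases h : d.contains p.2
  · simp [h]
  · have hg : d.getD p.2 [] = [] := by
      have : d.get? p.2 = none := by
        rw [PySem.Dict.get?_eq_none_iff_contains]
        simpa using h
      simp [PySem.Dict.getD, this]
    simp [h, PySem.Dict.modify, hg]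

theorem unique_sequences_stats_eq (l : List (String × String)) :
    unique_sequences_stats l = unique_sequences_stats_alt l := by
  unfold unique_sequences_stats unique_sequences_stats_alt
  have hstep : (fun (d : PySem.Dict String (List String)) (p : String × String) =>
      if d.contains p.2 then d.modify p.2 [] (fun v => v ++ [p.1])
      else d.insert p.2 [p.1])
      = fun d p => d.modify p.2 [] (fun v => v ++ [p.1]) :=
    funext fun d => funext fun p => stepA_eq_modify d p
  rw [hstep]
  -- rewrite the fold as a fold over the swapped pairs
  have hswap : l.foldl (fun (d : PySem.Dict String (List String)) p =>
        d.modify p.2 [] (fun v => v ++ [p.1])) PySem.Dict.empty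
      = (l.map (fun p => (p.2, p.1))).foldl
        (fun d q => d.modify q.1 [] (fun v => v ++ [q.2])) PySem.Dict.empty := by
    rw [List.foldl_map]
  rw [hswap]
  set L := l.map (fun p => (p.2, p.1)) with hL
  have hnd : ((L.foldl (fun d q => d.modify q.1 [] (fun v => v ++ [q.2]))
      (PySem.Dict.empty : PySem.Dict String (List String))).keys).Nodup := by
    exact PySem.Dict.nodup_keys_foldl_modify_key L (fun q => q.1)
      [] (fun d q => fun v => v ++ [q.2]) PySem.Dict.empty
      (by simp)
  rw [PySem.Dict.items_eq_map_keys _ hnd []]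
  have hkeys : (L.foldl (fun d q => d.modify q.1 [] (fun v => v ++ [q.2]))
      (PySem.Dict.empty : PySem.Dict String (List String))).keys
      = PySem.List.dedup (l.map Prod.snd) := by
    rw [PySem.Dict.keys_foldl_modify_key]
    simp [hL, List.map_map, PySem.Set.update, PySem.Set.ofList_eq_foldl,
      PySem.List.dedup, Function.comp_def]
  rw [hkeys]
  refine List.map_congr_left ?_
  intro s _
  rw [PySem.Dict.getD_foldl_modify_append]
  simp [hL, List.filter_map, List.map_map]
  rfl

-- ===== VERDICT (by name: the statement is the Claim_ definition above) =====
theorem unique_sequences_stats_spec : Claim_equal_unique_sequences_stats := by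
  intro l _
  unfold Spec_unique_sequences_stats
  exact unique_sequences_stats_eq l
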